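-- pv_equiv track=rewrite | github.com/ArmaghanKhan47/AI | Scrable/player.py | __findWordWithSpecificStarting__
-- ===== SOURCE A (Python) =====
-- def __findWordWithSpecificStarting__(wordlist, starting):
--     words = []
--     for y in starting:
--         for x in wordlist:
--             if x[0] == y and x not in words:
--                 words.append(x)
--             elif x[-1] == y and x not in words:
--                 words.append(x)
--     return words
-- ===== SOURCE B (Python) =====
-- def __findWordWithSpecificStarting__(wordlist, starting):
--     if not starting:
--         return []
--     index = {}
--     for x in wordlist:
--         index.setdefault(x[0], []).append(x)
--         if x[-1] != x[0]:
--             index.setdefault(x[-1], []).append(x)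
--     words = []
--     seen = set()
--     for y in starting:
--         for x in index.get(y, []):
--             if x not in seen:
--                 seen.add(x)
--                 words.append(x)
--     return words
-- ===== Notes on version B (the rewrite author's own statement) =====
-- stated objective: faster
-- what changed: B builds a one-pass dict index from first/last characters to words and a hash seen-set, so each character of `starting` touches only its own bucket and duplicate tests are O(1), instead of A's rescan of the whole wordlist per character with a linear `x not in words` test.
import Mathlib
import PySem

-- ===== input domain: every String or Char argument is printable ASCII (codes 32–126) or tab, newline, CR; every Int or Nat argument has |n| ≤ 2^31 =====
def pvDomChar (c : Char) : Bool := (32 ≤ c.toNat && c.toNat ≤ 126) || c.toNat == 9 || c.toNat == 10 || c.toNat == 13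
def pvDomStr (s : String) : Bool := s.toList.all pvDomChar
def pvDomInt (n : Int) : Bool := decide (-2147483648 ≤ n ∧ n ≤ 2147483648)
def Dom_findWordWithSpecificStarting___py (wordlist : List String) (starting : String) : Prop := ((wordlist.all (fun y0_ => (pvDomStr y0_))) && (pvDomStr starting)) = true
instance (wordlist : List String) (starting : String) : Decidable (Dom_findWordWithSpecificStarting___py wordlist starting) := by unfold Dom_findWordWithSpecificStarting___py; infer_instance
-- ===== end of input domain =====

-- B replaces A's per-character rescan of the whole wordlist (with a linear membership test)
-- by a dict index from first/last characters to word buckets plus a seen-set; return value only,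
-- no mutation in either program.

-- ===== PORT A =====
-- literal transliteration: for y in starting: for x in wordlist: if x[0]==y and x not in words … elif x[-1]==y and x not in words …
def findWordWithSpecificStarting___py (wordlist : List String) (starting : String) : List String :=
  starting.toList.foldl (fun words y =>
    wordlist.foldl (fun words x =>
      if PySem.Str.pyGet? x 0 = some y ∧ x ∉ words then words ++ [x]
      else if PySem.Str.pyGet? x (-1) = some y ∧ x ∉ words then words ++ [x]
      else words) words) []

-- ===== PORT B =====
-- index.setdefault(x[0], []).append(x); if x[-1] != x[0]: index.setdefault(x[-1], []).append(x)
-- (x[0]/x[-1] raise on an empty word in Python; the `.getD ' '` total form is exact on the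
--  Pre_ domain, where every word is nonempty whenever this code runs)
def pvIndex (wordlist : List String) : PySem.Dict Char (List String) :=
  wordlist.foldl (fun d x =>
    let f := (PySem.Str.pyGet? x 0).getD ' '
    let l := (PySem.Str.pyGet? x (-1)).getD ' '
    let d := d.modify f [] (· ++ [x])
    if l ≠ f then d.modify l [] (· ++ [x]) else d) PySem.Dict.empty

def findWordWithSpecificStarting___py_alt (wordlist : List String) (starting : String) : List String :=
  if starting.toList = [] then []
  else
    let index := pvIndex wordlist
    (starting.toList.foldl (fun (st : List String × PySem.Set String) y =>
      (index.getD y []).foldl (fun st x =>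
        if st.2.contains x then st else (st.1 ++ [x], st.2.add x)) st)
      ([], PySem.Set.empty)).1

-- ===== PRECONDITION & SPEC =====
-- Pre_ excludes exactly the inputs where A raises IndexError: a nonempty `starting` together
-- with an empty-string word (x[0] fails); B raises there too.
def Pre_findWordWithSpecificStarting___py (wordlist : List String) (starting : String) : Prop :=
  starting.toList = [] ∨ ∀ x ∈ wordlist, x.toList ≠ []
instance (wordlist : List String) (starting : String) : Decidable (Pre_findWordWithSpecificStarting___py wordlist starting) := by unfold Pre_findWordWithSpecificStarting___py; infer_instance

def pvWitness_findWordWithSpecificStarting___py : List String × String := (["ab", "ba", "cc"], "ab")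

def Spec_findWordWithSpecificStarting___py (wordlist : List String) (starting : String) (out : List String) : Prop := out = findWordWithSpecificStarting___py_alt wordlist starting
instance (wordlist : List String) (starting : String) (out : List String) : Decidable (Spec_findWordWithSpecificStarting___py wordlist starting out) := by unfold Spec_findWordWithSpecificStarting___py; infer_instance

-- ===== CLAIM (what is proved, stated in full; the proofs are below) =====
def Claim_equal_findWordWithSpecificStarting___py : Prop := ∀ (wordlist : List String) (starting : String), Dom_findWordWithSpecificStarting___py wordlist starting → Pre_findWordWithSpecificStarting___py wordlist starting → Spec_findWordWithSpecificStarting___py wordlist starting (findWordWithSpecificStarting___py wordlist starting)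

-- ===== LEMMAS AND PROOFS =====

-- first/last character, total forms used by B's port
def pvFC (x : String) : Char := (PySem.Str.pyGet? x 0).getD ' '
def pvLC (x : String) : Char := (PySem.Str.pyGet? x (-1)).getD ' '
def pvP (y : Char) (x : String) : Bool := pvFC x == y || pvLC x == y

lemma pvGet0 (x : String) (hx : x.toList ≠ []) : PySem.Str.pyGet? x 0 = some (pvFC x) := by
  have hl : 0 < x.length := by simpa using List.length_pos_iff.mpr hx
  have hs : (PySem.Str.pyGet? x 0).isSome := by
    simp [PySem.Str.pyGet?, PySem.Chars.pyGet?, PySem.List.pyGet?, PySem.List.pyIdx?, hl]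
  obtain ⟨c, hc⟩ := Option.isSome_iff_exists.mp hs
  unfold pvFC
  rw [hc]
  rfl

lemma pvGetNeg1 (x : String) (hx : x.toList ≠ []) : PySem.Str.pyGet? x (-1) = some (pvLC x) := by
  have hl : 1 ≤ x.length := by simpa using List.length_pos_iff.mpr hx
  have hs : (PySem.Str.pyGet? x (-1)).isSome := by
    simp only [PySem.Str.pyGet?, PySem.Chars.pyGet?, PySem.List.pyGet?, PySem.List.pyIdx?]
    norm_num [hl]
    exact hl
  obtain ⟨c, hc⟩ := Option.isSome_iff_exists.mp hs
  unfold pvLC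
  rw [hc]
  rfl

lemma pvBeq_comm (a y : Char) : (a == y) = decide (y = a) := by
  by_cases h : y = a
  · simp [h]
  · simp [h, Ne.symm h]

lemma pvP_eq (y : Char) (x : String) : pvP y x = (decide (y = pvFC x) || decide (y = pvLC x)) := by
  simp only [pvP, pvBeq_comm]

-- the index bucket for y is exactly the filter of the wordlist by pvP y, in order
lemma pvIndex_getD (wordlist : List String) (d : PySem.Dict Char (List String)) (y : Char) :
    (wordlist.foldl (fun d x =>
      let f := (PySem.Str.pyGet? x 0).getD ' '
      let l := (PySem.Str.pyGet? x (-1)).getD ' '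
      let d := d.modify f [] (· ++ [x])
      if l ≠ f then d.modify l [] (· ++ [x]) else d) d).getD y []
    = d.getD y [] ++ wordlist.filter (pvP y) := by
  induction wordlist generalizing d with
  | nil => simp
  | cons x xs ih =>
    simp only [List.foldl_cons, List.filter_cons, ih]
    by_cases hl : pvLC x = pvFC x <;>
      by_cases hf : y = pvFC x <;> by_cases hg : y = pvLC x <;>
      simp only [pvP_eq, pvFC, pvLC] at hl hf hg ⊢ <;>
      simp_all [PySem.Dict.getD_modify, List.append_assoc]

-- A's inner loop, with its two branches merged and pyGet? evaluated on nonempty words,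
-- equals the dedup-append loop over the filtered list
lemma pvInner_filter (y : Char) (l : List String) (hne : ∀ x ∈ l, x.toList ≠ []) (ws : List String) :
    l.foldl (fun words x =>
      if PySem.Str.pyGet? x 0 = some y ∧ x ∉ words then words ++ [x]
      else if PySem.Str.pyGet? x (-1) = some y ∧ x ∉ words then words ++ [x]
      else words) ws
    = (l.filter (pvP y)).foldl (fun words x => if x ∉ words then words ++ [x] else words) ws := by
  induction l generalizing ws with
  | nil => rfl
  | cons x xs ih =>
    have hx : x.toList ≠ [] := hne x (by simp)
    have hrest : ∀ z ∈ xs, z.toList ≠ [] := fun z hz => hne z (by simp [hz])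
    simp only [List.foldl_cons, List.filter_cons, pvGet0 x hx, pvGetNeg1 x hx]
    by_cases hmem : x ∈ ws <;>
      by_cases hf : pvFC x = y <;> by_cases hg : pvLC x = y <;>
      simp_all [pvP]

-- the seen-set is always exactly the membership of the accumulated word list
lemma pvSeen_fold (l : List String) (ws : List String) (s : PySem.Set String)
    (h : ∀ z, z ∈ s ↔ z ∈ ws) :
    (l.foldl (fun (st : List String × PySem.Set String) x =>
        if st.2.contains x then st else (st.1 ++ [x], st.2.add x)) (ws, s)).1
    = l.foldl (fun words x => if x ∉ words then words ++ [x] else words) ws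
    ∧ ∀ z, z ∈ (l.foldl (fun (st : List String × PySem.Set String) x =>
        if st.2.contains x then st else (st.1 ++ [x], st.2.add x)) (ws, s)).2
        ↔ z ∈ l.foldl (fun words x => if x ∉ words then words ++ [x] else words) ws := by
  induction l generalizing ws s with
  | nil => exact ⟨rfl, h⟩
  | cons x xs ih =>
    simp only [List.foldl_cons]
    by_cases hc : x ∈ s
    · have hmem : x ∈ ws := (h x).mp hc
      simpa [hc, hmem] using ih ws s h
    · have hmem : x ∉ ws := fun hm => hc ((h x).mpr hm)
      have h' : ∀ z, z ∈ s.add x ↔ z ∈ ws ++ [x] := by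
        intro z
        rw [PySem.Set.mem_add]
        simp [h z]
      simpa [hc, hmem] using ih (ws ++ [x]) (s.add x) h'

-- ===== VERDICT (by name: the statement is the Claim_ definition above) =====
theorem findWordWithSpecificStarting___py_spec : Claim_equal_findWordWithSpecificStarting___py := by
  intro wordlist starting _ hpre
  unfold Spec_findWordWithSpecificStarting___py
  unfold findWordWithSpecificStarting___py findWordWithSpecificStarting___py_alt
  by_cases hs : starting.toList = []
  · simp [hs]
  · have hne : ∀ x ∈ wordlist, x.toList ≠ [] := hpre.resolve_left hs
    simp only [if_neg hs]
    have hbucket : ∀ y, (pvIndex wordlist).getD y [] = wordlist.filter (pvP y) := by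
      intro y
      unfold pvIndex
      simpa using pvIndex_getD wordlist PySem.Dict.empty y
    have key : ∀ (cs : List Char) (ws : List String) (s : PySem.Set String),
        (∀ z, z ∈ s ↔ z ∈ ws) →
        cs.foldl (fun words y =>
          wordlist.foldl (fun words x =>
            if PySem.Str.pyGet? x 0 = some y ∧ x ∉ words then words ++ [x]
            else if PySem.Str.pyGet? x (-1) = some y ∧ x ∉ words then words ++ [x]
            else words) words) ws
        = (cs.foldl (fun (st : List String × PySem.Set String) y =>
            ((pvIndex wordlist).getD y []).foldl (fun st x =>
              if st.2.contains x then st else (st.1 ++ [x], st.2.add x)) st) (ws, s)).1 := by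
      intro cs
      induction cs with
      | nil => intro ws s _; rfl
      | cons y ys ih =>
        intro ws s h
        simp only [List.foldl_cons, hbucket y]
        obtain ⟨heq, hinv⟩ := pvSeen_fold (wordlist.filter (pvP y)) ws s h
        rw [pvInner_filter y wordlist hne ws]
        have hpair : ((wordlist.filter (pvP y)).foldl (fun (st : List String × PySem.Set String) x =>
            if st.2.contains x then st else (st.1 ++ [x], st.2.add x)) (ws, s))
            = (((wordlist.filter (pvP y)).foldl (fun (st : List String × PySem.Set String) x =>
            if st.2.contains x then st else (st.1 ++ [x], st.2.add x)) (ws, s)).1,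
            ((wordlist.filter (pvP y)).foldl (fun (st : List String × PySem.Set String) x =>
            if st.2.contains x then st else (st.1 ++ [x], st.2.add x)) (ws, s)).2) := rfl
        rw [hpair, heq]
        exact ih _ _ hinv
    exact key starting.toList [] PySem.Set.empty (by simp [PySem.Set.empty])
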